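-- pv_equiv track=rewrite | github.com/rebeccacremona/webrecorder | webrecorder/webrecorder/listscontroller.py | get_twitter_urls
-- ===== SOURCE A (Python) =====
-- def get_twitter_urls(handle):
--     since = None
--     until = None
--     pattern = 'https://twitter.com/search?q=from%3A$handle%20since%3A{since}%20until%3A{until}&src=typd'.replace('$handle', handle)
--
--     for year in range(2018, 2008, -1):
--         for month in range(12, 0, -1):
--             since = until
--             until = '%02d-%02d-01' % (year, month)
--             if since and until:
--                 res = pattern.format(since=until, until=since)
--                 yield since, res
-- ===== SOURCE B (Python) =====
-- def get_twitter_urls(handle):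
--     # month index n counts backwards from 2018-12 (n=0) to 2009-01 (n=119);
--     # each date is computed in closed form from n, no carried state or date list.
--     def date(n):
--         return '%02d-%02d-01' % (2018 - n // 12, 12 - n % 12)
--     base = 'https://twitter.com/search?q=from%3A' + handle + '%20since%3A'
--     return ((date(n), base + date(n + 1) + '%20until%3A' + date(n) + '&src=typd')
--             for n in range(119))
-- ===== Notes on version B (the rewrite author's own statement) =====
-- stated objective: alternative
-- what changed: Replaces the stateful nested year/month loop with a since/until carry and str.format on a template by a closed-form indexed computation: each date is computed directly from a month index n by arithmetic (year = 2018 - n//12, month = 12 - n%12), and pair n is emitted as (date(n), url built by concatenation from date(n+1) and date(n)) -- no date list, no carried state, no template rescanning.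
-- outside the precondition, e.g. on get_twitter_urls('a{b'): A raises ValueError; on get_twitter_urls('a}b'): A raises ValueError
import Mathlib
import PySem

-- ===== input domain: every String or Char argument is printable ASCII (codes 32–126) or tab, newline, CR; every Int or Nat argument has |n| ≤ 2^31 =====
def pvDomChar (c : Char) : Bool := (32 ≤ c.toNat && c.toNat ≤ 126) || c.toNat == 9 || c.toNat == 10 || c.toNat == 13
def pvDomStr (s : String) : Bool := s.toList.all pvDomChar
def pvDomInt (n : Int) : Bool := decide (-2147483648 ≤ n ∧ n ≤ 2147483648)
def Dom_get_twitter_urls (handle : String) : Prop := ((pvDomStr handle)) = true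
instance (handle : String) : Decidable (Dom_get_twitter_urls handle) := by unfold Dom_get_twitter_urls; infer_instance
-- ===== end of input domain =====

-- B replaces A's stateful since/until carry inside a nested year/month loop (template + str.format)
-- by a closed-form indexed computation: each date comes from a month index by arithmetic, each URL
-- by concatenation (alternative decomposition; no speed claim).

-- ===== PORT A =====
-- '%02d-%02d-01' % (year, month); %02d zero-pads to width 2 — exact for the nonnegative values used here
def pvDate (year month : Int) : String :=
  PySem.Str.zfill (PySem.Int.toStr year) 2 ++ "-" ++ PySem.Str.zfill (PySem.Int.toStr month) 2 ++ "-01"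

-- pattern.format(since=a, until=b): the template's only brace fields are {since} and {until}; under
-- Pre_ (no braces in handle) str.format is exactly these two textual replacements
def pvFormat (pattern a b : String) : String :=
  PySem.Str.replace (PySem.Str.replace pattern "{since}" a) "{until}" b

def get_twitter_urls (handle : String) : List (String × String) :=
  let pattern := PySem.Str.replace
    "https://twitter.com/search?q=from%3A$handle%20since%3A{since}%20until%3A{until}&src=typd"
    "$handle" handle
  let res := (PySem.List.pyRange 2018 2008 (-1)).foldl (fun st year =>
      (PySem.List.pyRange 12 0 (-1)).foldl (fun st month =>
        let until_ := pvDate year month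
        match st.2.2 with              -- since := until  (truthy iff some nonempty string)
        | some s =>
          if s ≠ "" ∧ until_ ≠ "" then (st.1 ++ [(s, pvFormat pattern until_ s)], some s, some until_)
          else (st.1, some s, some until_)
        | none => (st.1, none, some until_)) st)
    (([], none, none) : List (String × String) × Option String × Option String)
  res.1

-- ===== PORT B =====
-- date(n) = '%02d-%02d-01' % (2018 - n // 12, 12 - n % 12), Python floor division/modulo
def pvDateIdx (n : Int) : String :=
  PySem.Str.zfill (PySem.Int.toStr (2018 - PySem.Int.floordiv n 12)) 2 ++ "-" ++
  PySem.Str.zfill (PySem.Int.toStr (12 - PySem.Int.mod n 12)) 2 ++ "-01"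

def get_twitter_urls_alt (handle : String) : List (String × String) :=
  let base := "https://twitter.com/search?q=from%3A" ++ handle ++ "%20since%3A"
  (PySem.List.pyRange 0 119 1).map (fun n =>
    (pvDateIdx n, base ++ pvDateIdx (n + 1) ++ "%20until%3A" ++ pvDateIdx n ++ "&src=typd"))

-- ===== PRECONDITION & SPEC =====
-- Pre_ excludes handles containing a brace: on such handles A's str.format either raises
-- (ValueError/KeyError on stray braces or unknown field names) or, when the handle spells a field
-- of the template, substitutes a date into the handle itself — format injection, an artefact of
-- formatting after pasting the handle into the template.
def Pre_get_twitter_urls (handle : String) : Prop :=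
  '{' ∉ handle.toList ∧ '}' ∉ handle.toList
instance (handle : String) : Decidable (Pre_get_twitter_urls handle) := by
  unfold Pre_get_twitter_urls; infer_instance

def pvWitness_get_twitter_urls : String := "bob"

def Spec_get_twitter_urls (handle : String) (out : List (String × String)) : Prop :=
  out = get_twitter_urls_alt handle
instance (handle : String) (out : List (String × String)) : Decidable (Spec_get_twitter_urls handle out) := by
  unfold Spec_get_twitter_urls; infer_instance

-- ===== CLAIM (what is proved, stated in full; the proofs are below) =====
def Claim_equal_get_twitter_urls : Prop :=
  ∀ (handle : String), Dom_get_twitter_urls handle → Pre_get_twitter_urls handle →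
    Spec_get_twitter_urls handle (get_twitter_urls handle)

-- ===== LEMMAS AND PROOFS =====

-- replace.go: the accumulator factors out
theorem pv_go_acc (old new : List Char) (fuel : Nat) (l acc : List Char) :
    PySem.Chars.replace.go old new fuel l acc = acc.reverse ++ PySem.Chars.replace.go old new fuel l [] := by
  induction fuel generalizing l acc with
  | zero => simp [PySem.Chars.replace.go]
  | succ n ih =>
    cases l with
    | nil => simp [PySem.Chars.replace.go]
    | cons c t =>
      simp only [PySem.Chars.replace.go]
      split_ifs with h
      · rw [ih _ (new.reverse ++ acc), ih _ (new.reverse ++ [])]; simp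
      · rw [ih _ (c :: acc), ih _ (c :: [])]; simp

-- replace.go: any sufficient fuel gives the same result
theorem pv_go_fuel (old new : List Char) (hold : old ≠ []) :
    ∀ (fuel : Nat) (l : List Char), l.length ≤ fuel →
    PySem.Chars.replace.go old new fuel l [] = PySem.Chars.replace.go old new l.length l [] := by
  intro fuel
  induction fuel using Nat.strong_induction_on with
  | _ fuel ih =>
    match fuel with
    | 0 =>
      intro l h
      have : l = [] := by cases l <;> simp_all
      subst this; rfl
    | (n+1) =>
      intro l h
      cases l with
      | nil => simp [PySem.Chars.replace.go]
      | cons c t =>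
        simp only [PySem.Chars.replace.go, List.length_cons]
        simp only [List.length_cons] at h
        have hdl : (List.drop old.length (c :: t)).length ≤ t.length := by
          rw [List.length_drop]
          have h1 : 0 < old.length := List.length_pos_of_ne_nil hold
          simp; omega
        split_ifs with hp
        · rw [pv_go_acc _ _ n, pv_go_acc _ _ t.length]
          rw [ih n (by omega) _ (le_trans hdl (by omega)), ih t.length (by omega) _ hdl]
        · rw [pv_go_acc _ _ n _ [c], pv_go_acc _ _ t.length _ [c]]
          rw [ih n (by omega) _ (by omega), ih t.length (by omega) _ (le_refl _)]

theorem pv_replace_nil (c0 : Char) (o new : List Char) :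
    PySem.Chars.replace [] (c0 :: o) new = [] := rfl

-- one non-matching character is copied
theorem pv_replace_step (c0 : Char) (o new : List Char) (c : Char) (t : List Char)
    (hp : (c0 :: o).isPrefixOf (c :: t) = false) :
    PySem.Chars.replace (c :: t) (c0 :: o) new = c :: PySem.Chars.replace t (c0 :: o) new := by
  simp only [PySem.Chars.replace, List.isEmpty_cons, Bool.false_eq_true, if_false, List.length_cons]
  simp only [PySem.Chars.replace.go, hp, Bool.false_eq_true, if_false]
  rw [pv_go_acc]
  rfl

-- a match at the head is replaced
theorem pv_replace_match (c0 : Char) (o new l₂ : List Char) :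
    PySem.Chars.replace ((c0 :: o) ++ l₂) (c0 :: o) new = new ++ PySem.Chars.replace l₂ (c0 :: o) new := by
  have hpre : (c0 :: o).isPrefixOf ((c0 :: o) ++ l₂) = true := by
    rw [List.isPrefixOf_iff_prefix]
    exact List.prefix_append _ _
  have hlen : ((c0 :: o) ++ l₂).length = (o.length + l₂.length) + 1 := by simp
  rw [show ((c0 :: o) ++ l₂ : List Char) = c0 :: (o ++ l₂) from rfl] at hpre hlen ⊢
  simp only [PySem.Chars.replace, List.isEmpty_cons, Bool.false_eq_true, if_false, hlen]
  simp only [PySem.Chars.replace.go, hpre, if_true]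
  rw [show (c0 :: (o ++ l₂) : List Char) = (c0 :: o) ++ l₂ from rfl, List.drop_left, pv_go_acc,
      pv_go_fuel _ _ (by simp) _ _ (by omega)]
  simp

-- a block free of the pattern's first character is copied verbatim
theorem pv_replace_skip (c0 : Char) (o new l₁ l₂ : List Char) (h : c0 ∉ l₁) :
    PySem.Chars.replace (l₁ ++ l₂) (c0 :: o) new = l₁ ++ PySem.Chars.replace l₂ (c0 :: o) new := by
  induction l₁ with
  | nil => simp
  | cons c t ih =>
    simp only [List.mem_cons, not_or] at h
    have hc : (c0 == c) = false := beq_eq_false_iff_ne.mpr h.1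
    have hp : (c0 :: o).isPrefixOf (c :: (t ++ l₂)) = false := by
      simp [List.isPrefixOf, hc]
    rw [List.cons_append, pv_replace_step _ _ _ _ _ hp, ih (by simp [h.2])]
    rfl

-- a string free of the pattern's first character is unchanged
theorem pv_replace_none (c0 : Char) (o new l : List Char) (h : c0 ∉ l) :
    PySem.Chars.replace l (c0 :: o) new = l := by
  have := pv_replace_skip c0 o new l [] h
  simpa [pv_replace_nil] using this

-- the handle substitution: the template scanned around the symbolic handle
theorem pv_pattern_eq (h : List Char) :
    PySem.Chars.replace
      "https://twitter.com/search?q=from%3A$handle%20since%3A{since}%20until%3A{until}&src=typd".toList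
      "$handle".toList h
    = "https://twitter.com/search?q=from%3A".toList ++
      (h ++ "%20since%3A{since}%20until%3A{until}&src=typd".toList) := by
  rw [show "https://twitter.com/search?q=from%3A$handle%20since%3A{since}%20until%3A{until}&src=typd".toList
      = "https://twitter.com/search?q=from%3A".toList ++
        (('$' :: "handle".toList) ++ "%20since%3A{since}%20until%3A{until}&src=typd".toList) from by decide,
      show ("$handle".toList : List Char) = '$' :: "handle".toList from by decide,
      pv_replace_skip _ _ _ _ _ (by decide), pv_replace_match,
      pv_replace_none _ _ _ _ (by decide)]

-- the whole formatted URL, for a handle and a since-date free of '{'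
theorem pv_url_eq (h s u : List Char) (hh : '{' ∉ h) (hs : '{' ∉ s) :
    PySem.Chars.replace (PySem.Chars.replace
        ("https://twitter.com/search?q=from%3A".toList ++
         (h ++ "%20since%3A{since}%20until%3A{until}&src=typd".toList))
        "{since}".toList s) "{until}".toList u
    = "https://twitter.com/search?q=from%3A".toList ++
      (h ++ ("%20since%3A".toList ++ (s ++ ("%20until%3A".toList ++ (u ++ "&src=typd".toList))))) := by
  have e1 : PySem.Chars.replace
      "%20since%3A{since}%20until%3A{until}&src=typd".toList ('{' :: "since}".toList) s
      = "%20since%3A".toList ++ (s ++ ("%20until%3A".toList ++ ('{' :: "until}&src=typd".toList))) := by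
    rw [show "%20since%3A{since}%20until%3A{until}&src=typd".toList
          = "%20since%3A".toList ++ (('{' :: "since}".toList) ++
            ("%20until%3A".toList ++ ('{' :: "until}&src=typd".toList))) from by decide,
        pv_replace_skip _ _ _ _ _ (by decide),
        pv_replace_match,
        pv_replace_skip _ _ _ _ _ (by decide),
        pv_replace_step _ _ _ _ _ (by decide),
        pv_replace_none _ _ _ _ (by decide)]
  rw [show ("{since}".toList : List Char) = '{' :: "since}".toList from by decide,
      show ("{until}".toList : List Char) = '{' :: "until}".toList from by decide,
      pv_replace_skip _ _ _ _ _ (by decide),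
      pv_replace_skip _ _ _ _ _ hh,
      e1,
      pv_replace_skip _ _ _ _ _ (by decide),
      pv_replace_skip _ _ _ _ _ hh,
      pv_replace_skip _ _ _ _ _ (by decide),
      pv_replace_skip _ _ _ _ _ hs,
      pv_replace_skip _ _ _ _ _ (by decide),
      show ('{' :: "until}&src=typd".toList : List Char)
        = ('{' :: "until}".toList) ++ "&src=typd".toList from by decide,
      pv_replace_match,
      pv_replace_none _ _ _ _ (by decide)]

-- ----- loop characterisation -----

-- A's month-loop body as a function of the formatted date (proof-only helper)
def pvStep (pattern : String) (st : List (String × String) × Option String × Option String)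
    (d : String) : List (String × String) × Option String × Option String :=
  match st.2.2 with
  | some s =>
    if s ≠ "" ∧ d ≠ "" then (st.1 ++ [(s, pvFormat pattern d s)], some s, some d)
    else (st.1, some s, some d)
  | none => (st.1, none, some d)

-- the full ordered date list A's nested loop runs over (proof-only helper)
def pvDates : List String :=
  (PySem.List.pyRange 2018 2008 (-1)).flatMap (fun y =>
    (PySem.List.pyRange 12 0 (-1)).map (fun m => pvDate y m))

-- carrying a nonempty previous date, the fold emits exactly the adjacent pairs
theorem pv_loop (pat : String) : ∀ (ds : List String) (acc : List (String × String))
    (x : Option String) (prev : String), prev ≠ "" → (∀ d ∈ ds, d ≠ "") →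
    (ds.foldl (pvStep pat) (acc, x, some prev)).1
      = acc ++ ((prev :: ds).zip ds).map (fun pc => (pc.1, pvFormat pat pc.2 pc.1)) := by
  intro ds
  induction ds with
  | nil => intro acc x prev _ _; simp
  | cons d t ih =>
    intro acc x prev hprev hds
    have hd : d ≠ "" := hds d (by simp)
    simp only [List.foldl_cons, pvStep]
    rw [if_pos (show prev ≠ "" ∧ d ≠ "" from ⟨hprev, hd⟩)]
    rw [ih (acc ++ [(prev, pvFormat pat d prev)]) (some prev) d hd
        (fun e he => hds e (by simp [he]))]
    simp

theorem pv_loop_start (pat : String) (d0 : String) (rest : List String)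
    (h0 : d0 ≠ "") (hr : ∀ d ∈ rest, d ≠ "") :
    ((d0 :: rest).foldl (pvStep pat) (([], none, none) :
        List (String × String) × Option String × Option String)).1
      = ((d0 :: rest).zip rest).map (fun pc => (pc.1, pvFormat pat pc.2 pc.1)) := by
  simp only [List.foldl_cons, pvStep]
  rw [pv_loop pat rest [] none d0 h0 hr]
  simp

-- every generated date is nonempty and brace-free
set_option maxRecDepth 100000 in
theorem pv_dates_ok : ∀ d ∈ pvDates, d ≠ "" ∧ '{' ∉ d.toList := by decide

set_option maxRecDepth 100000 in
theorem pv_dates_ne_nil : pvDates ≠ [] := by decide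

-- B's index arithmetic generates exactly A's adjacent date pairs (concrete, checked by kernel)
set_option maxRecDepth 1000000 in
theorem pv_idx_pairs :
    (PySem.List.pyRange 0 119 1).map (fun n => (pvDateIdx n, pvDateIdx (n + 1)))
      = pvDates.zip pvDates.tail := by decide

-- one adjacent pair: A's formatted URL is B's concatenation
theorem pv_pair_eq (handle cur prev : String) (hh : '{' ∉ handle.toList) (hc : '{' ∉ cur.toList) :
    pvFormat (PySem.Str.replace
        "https://twitter.com/search?q=from%3A$handle%20since%3A{since}%20until%3A{until}&src=typd"
        "$handle" handle) cur prev
      = ("https://twitter.com/search?q=from%3A" ++ handle ++ "%20since%3A") ++ cur ++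
        "%20until%3A" ++ prev ++ "&src=typd" := by
  apply String.toList_inj.mp
  simp only [pvFormat, PySem.Str.replace, String.toList_ofList]
  rw [pv_pattern_eq, pv_url_eq _ _ _ hh hc]
  simp

-- ===== VERDICT (by name: the statement is the Claim_ definition above) =====
theorem get_twitter_urls_spec : Claim_equal_get_twitter_urls := by
  intro handle _ hpre
  obtain ⟨hh, -⟩ := hpre
  show get_twitter_urls handle = get_twitter_urls_alt handle
  have hA : get_twitter_urls handle
      = (pvDates.foldl (pvStep (PySem.Str.replace
          "https://twitter.com/search?q=from%3A$handle%20since%3A{since}%20until%3A{until}&src=typd"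
          "$handle" handle)) ([], none, none)).1 := by
    simp only [get_twitter_urls, pvDates, List.foldl_flatMap, List.foldl_map]
    rfl
  have hB : get_twitter_urls_alt handle
      = (pvDates.zip pvDates.tail).map (fun pc =>
          (pc.1, ("https://twitter.com/search?q=from%3A" ++ handle ++ "%20since%3A") ++ pc.2 ++
            "%20until%3A" ++ pc.1 ++ "&src=typd")) := by
    simp only [get_twitter_urls_alt]
    rw [← pv_idx_pairs, List.map_map]
    rfl
  obtain ⟨d0, rest, hL⟩ : ∃ d0 rest, pvDates = d0 :: rest := by
    cases e : pvDates with
    | nil => exact absurd e pv_dates_ne_nil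
    | cons a b => exact ⟨a, b, rfl⟩
  rw [hA, hB, hL]
  rw [pv_loop_start _ d0 rest (pv_dates_ok d0 (by rw [hL]; simp)).1
      (fun d hd => (pv_dates_ok d (by rw [hL]; simp [hd])).1)]
  simp only [List.tail_cons]
  apply List.map_congr_left
  rintro ⟨prev, cur⟩ hmem
  obtain ⟨hp, hcm⟩ := List.of_mem_zip hmem
  have hc : '{' ∉ cur.toList := (pv_dates_ok cur (by rw [hL]; simp [hcm])).2
  simp only
  rw [pv_pair_eq handle cur prev hh hc]
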